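-- pv_equiv track=rewrite | github.com/dima17502/Python-Programes | extended_gcd.py | euler_func
-- ===== SOURCE A (Python) =====
-- def euler_func(fact_list):
--     fact_dict = {}
--     for i in fact_list:
--         fact_dict[i] = fact_dict.get(i, 0) + 1
--     res = 1
--     for i in fact_dict:
--         res *= (i**fact_dict[i] - i**(fact_dict[i] - 1))
--     return res
-- ===== SOURCE B (Python) =====
-- def euler_func(fact_list):
--     # phi via the product formula: n * prod over distinct p of (p-1)/p,
--     # with exact integer arithmetic (res is always divisible by p).
--     n = 1
--     for p in fact_list:
--         n *= p
--     res = n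
--     for p in dict.fromkeys(fact_list):
--         res = res // p * (p - 1)
--     return res
-- ===== Notes on version B (the rewrite author's own statement) =====
-- stated objective: alternative
-- what changed: Instead of building a multiplicity dict and multiplying per-factor contributions p^k - p^(k-1), B computes n as the product of the whole list and applies the totient product formula res = res // p * (p - 1) once per distinct factor via exact integer division.
-- outside the precondition, e.g. on euler_func([0]): A returns -1, B raises ZeroDivisionError
import Mathlib
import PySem

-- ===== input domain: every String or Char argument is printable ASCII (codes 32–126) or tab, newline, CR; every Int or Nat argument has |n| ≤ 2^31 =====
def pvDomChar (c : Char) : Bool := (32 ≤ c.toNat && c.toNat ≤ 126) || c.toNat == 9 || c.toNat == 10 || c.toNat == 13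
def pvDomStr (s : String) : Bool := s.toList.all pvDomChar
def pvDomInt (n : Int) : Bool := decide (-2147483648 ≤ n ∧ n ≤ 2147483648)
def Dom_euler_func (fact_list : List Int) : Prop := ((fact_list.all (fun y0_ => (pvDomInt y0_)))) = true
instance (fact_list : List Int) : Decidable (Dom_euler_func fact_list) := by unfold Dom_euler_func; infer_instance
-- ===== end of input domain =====

-- B replaces A's per-prime (p^k - p^(k-1)) contributions built from a multiplicity dict by the
-- product formula phi(n) = n * prod over distinct p of (p-1)/p, computed with exact integer
-- division over the deduplicated factor list (objective: alternative decomposition, no dict of counts).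

-- ===== PORT A =====
def euler_func (fact_list : List Int) : Int :=
  let fact_dict : PySem.Dict Int Int :=
    fact_list.foldl (fun d i => d.insert i (d.getD i 0 + 1)) PySem.Dict.empty
  -- 'for i in fact_dict: res *= i**fact_dict[i] - i**(fact_dict[i]-1)'; every key is present,
  -- so fact_dict[i] is getD with an unused default
  fact_dict.keys.foldl
    (fun res i => res * (i ^ (fact_dict.getD i 0).toNat - i ^ ((fact_dict.getD i 0) - 1).toNat)) 1

-- ===== PORT B =====
def euler_func_alt (fact_list : List Int) : Int :=
  let n := fact_list.foldl (· * ·) 1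
  -- 'for p in dict.fromkeys(fact_list): res = res // p * (p - 1)'
  (PySem.List.dedup fact_list).foldl (fun res p => PySem.Int.floordiv res p * (p - 1)) n

-- ===== PRECONDITION & SPEC =====
-- Pre_ excludes lists containing 0: there A's '0**1 - 0**0' yields an accidental -1 factor,
-- while B's division by the factor raises ZeroDivisionError.
def Pre_euler_func (fact_list : List Int) : Prop := (0 : Int) ∉ fact_list
instance (fact_list : List Int) : Decidable (Pre_euler_func fact_list) := by
  unfold Pre_euler_func; infer_instance
def pvWitness_euler_func : List Int := [2, 2, 3]

def Spec_euler_func (fact_list : List Int) (out : Int) : Prop := out = euler_func_alt fact_list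
instance (fact_list : List Int) (out : Int) : Decidable (Spec_euler_func fact_list out) := by
  unfold Spec_euler_func; infer_instance

-- ===== CLAIM (what is proved, stated in full; the proofs are below) =====
def Claim_equal_euler_func : Prop := ∀ (fact_list : List Int), Dom_euler_func fact_list → Pre_euler_func fact_list → Spec_euler_func fact_list (euler_func fact_list)

-- ===== LEMMAS AND PROOFS =====

-- B's division loop: starting from acc times the full product of p^(e p), each exact
-- division by p followed by multiplication with (p-1) turns the p-factor into p^(e p) - p^(e p - 1).
lemma euler_fold_key (e : Int → Nat) :
    ∀ (ds : List Int) (acc : Int), (∀ p ∈ ds, p ≠ 0 ∧ 1 ≤ e p) →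
    ds.foldl (fun r p => PySem.Int.floordiv r p * (p - 1))
        (acc * (ds.map (fun p => p ^ e p)).prod)
      = acc * (ds.map (fun p => p ^ e p - p ^ (e p - 1))).prod := by
  intro ds
  induction ds with
  | nil => intro acc _; simp
  | cons p rs ih =>
    intro acc h
    obtain ⟨hp, he⟩ := h p (List.mem_cons_self ..)
    have hpow : p ^ e p = p * p ^ (e p - 1) := by
      conv_lhs => rw [show e p = (e p - 1) + 1 from by omega]
      ring
    simp only [List.foldl_cons, List.map_cons, List.prod_cons]
    have hdiv : PySem.Int.floordiv (acc * (p ^ e p * (rs.map (fun p => p ^ e p)).prod)) p * (p - 1)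
        = (acc * (p ^ e p - p ^ (e p - 1))) * (rs.map (fun p => p ^ e p)).prod := by
      have h1 : acc * (p ^ e p * (rs.map (fun p => p ^ e p)).prod)
          = p * (acc * p ^ (e p - 1) * (rs.map (fun p => p ^ e p)).prod) := by
        rw [hpow]; ring
      rw [h1]
      simp only [PySem.Int.floordiv, Int.mul_fdiv_cancel_left _ hp]
      rw [hpow]; ring
    rw [hdiv, ih _ (fun q hq => h q (List.mem_cons_of_mem _ hq))]
    ring

-- the running product of the whole list, regrouped per distinct factor
lemma foldl_mul_eq_prod_pow (xs : List Int) :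
    xs.foldl (· * ·) 1 = ((PySem.Set.ofList xs).map (fun p => p ^ xs.count p)).prod := by
  rw [← List.prod_eq_foldl, Finset.prod_list_count xs,
      ← List.prod_toFinset _ (PySem.Set.nodup_ofList xs)]
  apply Finset.prod_congr
  · ext x; simp [PySem.Set.mem_ofList]
  · intro x _; rfl

theorem euler_func_spec : Claim_equal_euler_func := by
  intro fact_list _ hpre
  unfold Spec_euler_func euler_func euler_func_alt
  simp only [PySem.Dict.foldl_insert_getD_add_one_eq_counter, PySem.Dict.keys_counter,
    PySem.Dict.getD_counter, PySem.List.dedup_eq_ofList, foldl_mul_eq_prod_pow]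
  have hcast : ∀ p ∈ PySem.Set.ofList fact_list,
      ((fact_list.count p : Int)).toNat = fact_list.count p ∧
      ((fact_list.count p : Int) - 1).toNat = fact_list.count p - 1 := by
    intro p _; omega
  have hrw : (PySem.Set.ofList fact_list).foldl
      (fun res i => res * (i ^ ((fact_list.count i : Int)).toNat
        - i ^ (((fact_list.count i : Int)) - 1).toNat)) 1
      = (PySem.Set.ofList fact_list).foldl
      (fun res i => res * (i ^ fact_list.count i - i ^ (fact_list.count i - 1))) 1 := by
    apply PySem.List.foldl_congr_mem
    intro res p hp
    rw [(hcast p hp).1, (hcast p hp).2]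
  rw [hrw]
  have hkey := euler_fold_key (fun p => fact_list.count p) (PySem.Set.ofList fact_list) 1
    (by
      intro p hp
      have hmem : p ∈ fact_list := (PySem.Set.mem_ofList ..).1 hp
      refine ⟨fun h0 => hpre (h0 ▸ hmem), ?_⟩
      exact List.count_pos_iff.mpr hmem)
  rw [one_mul] at hkey
  rw [hkey, List.prod_eq_foldl, List.foldl_map]
  simp only [one_mul]

-- ===== VERDICT (by name: the statement is the Claim_ definition above) =====
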